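-- pv_equiv track=rewrite | github.com/jacksonjp0311-gif/voynich-os | engine/sentence_fusion_v5_1.py | fuse_fragments
-- ===== SOURCE A (Python) =====
-- def fuse_fragments(surface):
--     """Fuse proto-translation units into proto-sentences."""
--     units = surface.get("units", [])
--     fused = []
--     window = []
--
--     for u in units:
--         token = u.get("token", "")
--         window.append(token)
--
--         if len(window) >= 5:
--             fused.append(" ".join(window))
--             window = []
--
--     if window:
--         fused.append(" ".join(window))
--
--     return fused
-- ===== SOURCE B (Python) =====
-- def fuse_fragments(surface):
--     """Fuse proto-translation units into proto-sentences."""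
--     units = surface.get("units", [])
--     tokens = [u.get("token", "") for u in units]
--     return [" ".join(tokens[i:i+5]) for i in range(0, len(tokens), 5)]
-- ===== Notes on version B (the rewrite author's own statement) =====
-- stated objective: idiomatic
-- what changed: Replaced the accumulate-and-flush window loop (mutable window reset at 5, trailing flush) by a two-phase computation: collect all tokens in one comprehension, then join strided slices tokens[i:i+5] over range(0, len(tokens), 5); the partial tail falls out of the last slice.
import Mathlib
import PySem

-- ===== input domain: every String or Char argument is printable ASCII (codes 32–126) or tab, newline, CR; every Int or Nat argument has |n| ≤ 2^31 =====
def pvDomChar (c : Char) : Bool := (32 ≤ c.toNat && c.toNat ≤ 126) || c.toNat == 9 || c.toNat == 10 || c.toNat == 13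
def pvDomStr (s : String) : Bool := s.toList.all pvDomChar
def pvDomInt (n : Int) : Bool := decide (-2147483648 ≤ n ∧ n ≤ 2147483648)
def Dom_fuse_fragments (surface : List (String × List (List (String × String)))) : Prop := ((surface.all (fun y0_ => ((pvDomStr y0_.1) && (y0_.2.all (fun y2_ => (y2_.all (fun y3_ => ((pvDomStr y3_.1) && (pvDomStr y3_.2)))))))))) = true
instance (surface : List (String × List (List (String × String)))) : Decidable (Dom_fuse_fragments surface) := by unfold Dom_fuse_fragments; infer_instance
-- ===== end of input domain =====

-- B replaces A's accumulate-and-flush window loop by a two-phase computation (collect all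
-- tokens, then join strided 5-slices); objective: more idiomatic, same asymptotic cost.

-- ===== PORT A =====
-- A: online loop with a window accumulator, flushed each time it reaches 5 tokens, plus a trailing flush.
def fuse_fragments (surface : List (String × List (List (String × String)))) : List String :=
  let units := (PySem.Dict.mk surface).getD "units" []
  let st := units.foldl
    (fun (st : List String × List String) u =>
      let token := (PySem.Dict.mk u).getD "token" ""
      let window := st.2 ++ [token]
      if window.length ≥ 5 then (st.1 ++ [PySem.Str.join " " window], [])
      else (st.1, window))
    ([], [])
  if st.2 ≠ [] then st.1 ++ [PySem.Str.join " " st.2] else st.1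

-- ===== PORT B =====
-- B: collect all tokens, then join the slices tokens[i:i+5] for i in range(0, len(tokens), 5).
def fuse_fragments_alt (surface : List (String × List (List (String × String)))) : List String :=
  let units := (PySem.Dict.mk surface).getD "units" []
  let tokens := units.map (fun u => (PySem.Dict.mk u).getD "token" "")
  (PySem.List.pyRange 0 (tokens.length : Int) 5).map
    (fun i => PySem.Str.join " " (PySem.List.slice tokens (some i) (some (i + 5))))

-- ===== PRECONDITION & SPEC =====
def Spec_fuse_fragments (surface : List (String × List (List (String × String)))) (out : List String) : Prop := out = fuse_fragments_alt surface
instance (surface : List (String × List (List (String × String)))) (out : List String) : Decidable (Spec_fuse_fragments surface out) := by unfold Spec_fuse_fragments; infer_instance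

-- ===== CLAIM (what is proved, stated in full; the proofs are below) =====
def Claim_equal_fuse_fragments : Prop := ∀ (surface : List (String × List (List (String × String)))), Dom_fuse_fragments surface → Spec_fuse_fragments surface (fuse_fragments surface)

-- ===== LEMMAS AND PROOFS =====

-- a step of range(·, ·, 5)
theorem pyRange5_cons (a n : Int) (h : a < n) :
    PySem.List.pyRange a n 5 = a :: PySem.List.pyRange (a + 5) n 5 := by
  simp only [PySem.List.pyRange]
  have h5 : ((n - a + 5 - 1) / 5).toNat = ((n - (a + 5) + 5 - 1) / 5).toNat + 1 := by omega
  norm_num [if_pos h, h5]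
  have hiff : (if a + 5 < n then ((n - (a + 5) + 5 - 1) / 5).toNat else 0)
      = ((n - (a + 5) + 5 - 1) / 5).toNat := by
    by_cases h2 : a + 5 < n
    · rw [if_pos h2]
    · rw [if_neg h2]; omega
  rw [hiff, List.range_succ_eq_map]
  simp only [List.map_cons, List.map_map]
  norm_num
  intro k _
  ring

theorem pyRange5_nil (a n : Int) (h : n ≤ a) : PySem.List.pyRange a n 5 = [] := by
  simp only [PySem.List.pyRange]
  norm_num
  omega

-- reference chunking: join the first ≤5 tokens, recurse on the rest
def chunkJoin (l : List String) : List String :=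
  if _h : l = [] then []
  else PySem.Str.join " " (l.take 5) :: chunkJoin (l.drop 5)
  termination_by l.length
  decreasing_by cases l with
    | nil => exact absurd rfl _h
    | cons x xs => simp

theorem chunkJoin_nil : chunkJoin [] = [] := by rw [chunkJoin]; simp

theorem chunkJoin_cons (l : List String) (h : l ≠ []) :
    chunkJoin l = PySem.Str.join " " (l.take 5) :: chunkJoin (l.drop 5) := by
  rw [chunkJoin]; simp [h]

-- A's loop step and finish, as named functions
def stepA (st : List String × List String) (token : String) : List String × List String :=
  if (st.2 ++ [token]).length ≥ 5 then (st.1 ++ [PySem.Str.join " " (st.2 ++ [token])], [])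
  else (st.1, st.2 ++ [token])

def finishA (st : List String × List String) : List String :=
  if st.2 ≠ [] then st.1 ++ [PySem.Str.join " " st.2] else st.1

-- B equals chunkJoin: stride over the suffix starting at k
theorem alt_from (tokens : List String) : ∀ (k : Nat),
    (PySem.List.pyRange (k : Int) (tokens.length : Int) 5).map
      (fun i => PySem.Str.join " " (PySem.List.slice tokens (some i) (some (i + 5))))
      = chunkJoin (tokens.drop k) := by
  intro k
  by_cases h : k < tokens.length
  · have hcons := pyRange5_cons (k : Int) (tokens.length : Int) (by exact_mod_cast h)
    rw [hcons]
    have hrec := alt_from tokens (k + 5)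
    have hk5 : ((k : Int) + 5) = ((k + 5 : Nat) : Int) := by push_cast; ring
    rw [List.map_cons, hk5, hrec]
    have hslice : PySem.List.slice tokens (some (k : Int)) (some ((k + 5 : Nat) : Int))
        = (tokens.drop k).take 5 := by
      have := PySem.List.slice_natCast (xs := tokens) (a := k) (b := k + 5)
      simpa using this
    rw [hslice]
    have hne : tokens.drop k ≠ [] := by
      intro hnil
      have := List.length_drop (l := tokens) (i := k)
      rw [hnil] at this
      simp at this
      omega
    rw [chunkJoin_cons _ hne, List.drop_drop]
  · rw [pyRange5_nil _ _ (by exact_mod_cast Nat.le_of_not_lt h)]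
    rw [List.drop_eq_nil_of_le (by omega), chunkJoin_nil]
    rfl
  termination_by k => tokens.length - k
  decreasing_by omega

-- A's loop unrolled against chunkJoin: accumulate a window w of length < 5 through ts
theorem loopA_eq (ts : List String) : ∀ (fused w : List String), w.length < 5 →
    finishA (ts.foldl stepA (fused, w)) = fused ++ chunkJoin (w ++ ts) := by
  induction ts with
  | nil =>
      intro fused w hw
      cases w with
      | nil => simp [finishA, chunkJoin_nil]
      | cons x xs =>
          simp only [List.foldl_nil, List.append_nil, finishA]
          rw [if_pos (by simp)]
          rw [chunkJoin_cons _ (by simp)]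
          have h1 : (x :: xs).take 5 = x :: xs := List.take_of_length_le (by simpa using hw.le)
          have h2 : (x :: xs).drop 5 = [] := List.drop_eq_nil_of_le (by simpa using hw.le)
          rw [h1, h2, chunkJoin_nil]
  | cons t ts ih =>
      intro fused w hw
      simp only [List.foldl_cons]
      by_cases h5 : (w ++ [t]).length ≥ 5
      · have hstep : stepA (fused, w) t = (fused ++ [PySem.Str.join " " (w ++ [t])], []) := by
          simp only [stepA]; rw [if_pos h5]
        rw [hstep, ih _ [] (by norm_num), List.nil_append]
        have hlen : (w ++ [t]).length = 5 := by simp at h5 ⊢; omega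
        have hassoc : w ++ t :: ts = (w ++ [t]) ++ ts := by simp
        have ht5 : ((w ++ [t]) ++ ts).take 5 = w ++ [t] := by
          rw [show (5 : Nat) = (w ++ [t]).length from hlen.symm]
          exact List.take_left (l₁ := w ++ [t]) (l₂ := ts)
        have hd5 : ((w ++ [t]) ++ ts).drop 5 = ts := by
          rw [show (5 : Nat) = (w ++ [t]).length from hlen.symm]
          exact List.drop_left (l₁ := w ++ [t]) (l₂ := ts)
        have hR : chunkJoin ((w ++ [t]) ++ ts)
            = PySem.Str.join " " (w ++ [t]) :: chunkJoin ts := by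
          rw [chunkJoin_cons _ (by simp), ht5, hd5]
        rw [hassoc, hR]
        simp
      · have hstep : stepA (fused, w) t = (fused, w ++ [t]) := by
          simp only [stepA]; rw [if_neg h5]
        rw [hstep, ih fused (w ++ [t]) (by simp at h5 ⊢; omega)]
        simp

-- ===== VERDICT (by name: the statement is the Claim_ definition above) =====
theorem fuse_fragments_spec : Claim_equal_fuse_fragments := by
  intro surface _
  unfold Spec_fuse_fragments fuse_fragments fuse_fragments_alt
  show finishA
      (((PySem.Dict.mk surface).getD "units" []).foldl
        (fun st u => stepA st ((PySem.Dict.mk u).getD "token" "")) ([], [])) = _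
  rw [← List.foldl_map (f := fun u => (PySem.Dict.mk u).getD "token" "") (g := stepA)]
  rw [loopA_eq _ [] [] (by norm_num), List.nil_append, List.nil_append]
  have := alt_from (((PySem.Dict.mk surface).getD "units" []).map
    (fun u => (PySem.Dict.mk u).getD "token" "")) 0
  simpa using this.symm
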